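-- pv_equiv track=rewrite | github.com/zaris-ai/smart_marketing_back | python/crews/manage_competitor_analysis/crew.py | _apply_selection_rules
-- ===== SOURCE A (Python) =====
-- def _apply_selection_rules(competitors, selected_ids, excluded_ids, max_selected):
--     selected_ids = {str(item).strip() for item in selected_ids if str(item).strip()}
--     excluded_ids = {str(item).strip() for item in excluded_ids if str(item).strip()}
--
--     active_competitors = [item for item in competitors if item.get("status") == "active"]
--
--     if selected_ids:
--         active_competitors = [
--             item for item in active_competitors if item.get("id") in selected_ids
--         ]
--
--     if excluded_ids:
--         active_competitors = [
--             item for item in active_competitors if item.get("id") not in excluded_ids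
--         ]
--
--     if max_selected and max_selected > 0:
--         active_competitors = active_competitors[:max_selected]
--
--     return active_competitors
-- ===== SOURCE B (Python) =====
-- def _apply_selection_rules(competitors, selected_ids, excluded_ids, max_selected):
--     sel = {str(item).strip() for item in selected_ids if str(item).strip()}
--     exc = {str(item).strip() for item in excluded_ids if str(item).strip()}
--     cap = max_selected if max_selected and max_selected > 0 else None
--     result = []
--     for item in competitors:
--         if cap is not None and len(result) >= cap:
--             break
--         if item.get("status") != "active":
--             continue
--         cid = item.get("id")
--         if sel and cid not in sel:
--             continue
--         if cid in exc:
--             continue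
--         result.append(item)
--     return result
-- ===== Notes on version B (the rewrite author's own statement) =====
-- stated objective: alternative
-- what changed: Replaces A's three sequential filter comprehensions plus a trailing slice by a single early-terminating pass that maintains one result list and breaks as soon as the cap is reached.
import Mathlib
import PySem

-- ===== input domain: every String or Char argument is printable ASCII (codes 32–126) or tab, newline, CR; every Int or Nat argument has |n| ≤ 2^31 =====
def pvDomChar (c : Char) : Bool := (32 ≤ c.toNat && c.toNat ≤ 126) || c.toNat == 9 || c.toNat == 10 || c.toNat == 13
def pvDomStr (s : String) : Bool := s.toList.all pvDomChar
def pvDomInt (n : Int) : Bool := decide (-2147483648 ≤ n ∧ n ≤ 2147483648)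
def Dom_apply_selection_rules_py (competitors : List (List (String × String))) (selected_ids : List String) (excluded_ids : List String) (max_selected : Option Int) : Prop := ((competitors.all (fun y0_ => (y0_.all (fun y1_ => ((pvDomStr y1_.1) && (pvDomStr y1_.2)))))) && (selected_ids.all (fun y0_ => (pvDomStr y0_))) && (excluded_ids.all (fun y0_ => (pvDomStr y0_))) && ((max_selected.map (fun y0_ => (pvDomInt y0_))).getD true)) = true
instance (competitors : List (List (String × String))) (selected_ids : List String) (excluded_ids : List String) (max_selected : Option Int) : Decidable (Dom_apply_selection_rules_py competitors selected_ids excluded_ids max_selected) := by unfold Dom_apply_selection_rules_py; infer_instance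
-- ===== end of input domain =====

-- B replaces A's three sequential filter passes plus a trailing slice by one early-terminating
-- pass that appends keepers and stops at the cap (alternative decomposition, same cost class).


-- ===== PORT A =====
-- {str(item).strip() for item in xs if str(item).strip()}  (str() is identity on str)
def pvStripSet (xs : List String) : PySem.Set String :=
  PySem.Set.ofList ((xs.map (fun s => PySem.Str.strip s)).filter (fun s => s != ""))

-- item.get(k) on a dict given as its association list
def pvGet (item : List (String × String)) (k : String) : Option String :=
  PySem.Dict.get? (PySem.Dict.mk item) k

-- 'o in s' where o may be None (None is never in a set of strings)
def pvOptIn (o : Option String) (s : List String) : Bool :=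
  match o with
  | some v => s.contains v
  | none => false

def apply_selection_rules_py (competitors : List (List (String × String))) (selected_ids : List String) (excluded_ids : List String) (max_selected : Option Int) : List (List (String × String)) :=
  let selS := pvStripSet selected_ids
  let excS := pvStripSet excluded_ids
  let ac := competitors.filter (fun item => pvGet item "status" == some "active")
  let ac := if selS != [] then ac.filter (fun item => pvOptIn (pvGet item "id") selS) else ac
  let ac := if excS != [] then ac.filter (fun item => !(pvOptIn (pvGet item "id") excS)) else ac
  match max_selected with
  | some n => if 0 < n then PySem.List.slice ac none (some n) else ac
  | none => ac

-- ===== PORT B =====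
-- 'cap is not None and len(result) >= cap'
def pvCapHit (cap : Option Int) (k : Nat) : Bool :=
  match cap with
  | some c => decide (c ≤ (k : Int))
  | none => false

-- B's single loop: break at the cap, 'continue' on each skip condition, append otherwise.
def pvLoop (selS excS : List String) (cap : Option Int) :
    List (List (String × String)) → List (List (String × String)) → List (List (String × String))
  | [], acc => acc
  | item :: rest, acc =>
    if pvCapHit cap acc.length then acc
    else if !(pvGet item "status" == some "active") then pvLoop selS excS cap rest acc
    else if selS != [] && !(pvOptIn (pvGet item "id") selS) then pvLoop selS excS cap rest acc
    else if pvOptIn (pvGet item "id") excS then pvLoop selS excS cap rest acc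
    else pvLoop selS excS cap rest (acc ++ [item])

def apply_selection_rules_py_alt (competitors : List (List (String × String))) (selected_ids : List String) (excluded_ids : List String) (max_selected : Option Int) : List (List (String × String)) :=
  let selS := pvStripSet selected_ids
  let excS := pvStripSet excluded_ids
  let cap : Option Int := match max_selected with | some n => if 0 < n then some n else none | none => none
  pvLoop selS excS cap competitors []

-- ===== PRECONDITION & SPEC =====
def Spec_apply_selection_rules_py (competitors : List (List (String × String))) (selected_ids : List String) (excluded_ids : List String) (max_selected : Option Int) (out : List (List (String × String))) : Prop := out = apply_selection_rules_py_alt competitors selected_ids excluded_ids max_selected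
instance (competitors : List (List (String × String))) (selected_ids : List String) (excluded_ids : List String) (max_selected : Option Int) (out : List (List (String × String))) : Decidable (Spec_apply_selection_rules_py competitors selected_ids excluded_ids max_selected out) := by unfold Spec_apply_selection_rules_py; infer_instance

-- ===== CLAIM (what is proved, stated in full; the proofs are below) =====
def Claim_equal_apply_selection_rules_py : Prop := ∀ (competitors : List (List (String × String))) (selected_ids : List String) (excluded_ids : List String) (max_selected : Option Int), Dom_apply_selection_rules_py competitors selected_ids excluded_ids max_selected → Spec_apply_selection_rules_py competitors selected_ids excluded_ids max_selected (apply_selection_rules_py competitors selected_ids excluded_ids max_selected)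

-- ===== LEMMAS AND PROOFS =====

-- the combined keep predicate of B's loop
def pvKeep (selS excS : List String) (item : List (String × String)) : Bool :=
  (pvGet item "status" == some "active")
  && (selS == [] || pvOptIn (pvGet item "id") selS)
  && !(pvOptIn (pvGet item "id") excS)

-- the cap applied to a list, given k items already taken
def pvCut (cap : Option Int) (k : Nat) (xs : List (List (String × String))) : List (List (String × String)) :=
  match cap with
  | some c => xs.take (c - (k : Int)).toNat
  | none => xs

theorem pvLoop_cons_of_not_hit (selS excS : List String) (cap : Option Int)
    (item : List (String × String)) (rest acc : List (List (String × String)))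
    (h : pvCapHit cap acc.length = false) :
    pvLoop selS excS cap (item :: rest) acc =
      if pvKeep selS excS item then pvLoop selS excS cap rest (acc ++ [item])
      else pvLoop selS excS cap rest acc := by
  rw [pvLoop.eq_def]
  dsimp only
  rw [if_neg (by simp [h])]
  rcases Bool.eq_false_or_eq_true (pvGet item "status" == some "active") with h1 | h1 <;>
  rcases Bool.eq_false_or_eq_true (selS == []) with hs | hs <;>
  rcases Bool.eq_false_or_eq_true (pvOptIn (pvGet item "id") selS) with h2 | h2 <;>
  rcases Bool.eq_false_or_eq_true (pvOptIn (pvGet item "id") excS) with h3 | h3 <;>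
    simp [pvKeep, bne, h1, hs, h2, h3]

theorem pvLoop_eq (selS excS : List String) (cap : Option Int)
    (l acc : List (List (String × String))) :
    pvLoop selS excS cap l acc = acc ++ pvCut cap acc.length (l.filter (pvKeep selS excS)) := by
  induction l generalizing acc with
  | nil =>
    cases cap <;> simp [pvLoop, pvCut]
  | cons item rest ih =>
    by_cases hcap : pvCapHit cap acc.length = true
    · rw [pvLoop.eq_def]
      dsimp only
      rw [if_pos hcap]
      cases cap with
      | none => simp [pvCapHit] at hcap
      | some c =>
        simp only [pvCapHit, decide_eq_true_eq] at hcap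
        have hz : (c - (acc.length : Int)).toNat = 0 := by omega
        simp [pvCut, hz]
    · rw [pvLoop_cons_of_not_hit selS excS cap item rest acc (by simpa using hcap)]
      by_cases hk : pvKeep selS excS item = true
      · rw [if_pos hk, ih, List.filter_cons_of_pos hk]
        cases cap with
        | none => simp [pvCut]
        | some c =>
          simp only [pvCut]
          have hlt : (acc.length : Int) < c := by
            simp only [pvCapHit, decide_eq_true_eq] at hcap; omega
          have hsucc : (c - (acc.length : Int)).toNat = (c - ((acc.length : Int) + 1)).toNat + 1 := by
            omega
          simp [hsucc, List.take_succ_cons]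
      · rw [if_neg hk, ih, List.filter_cons_of_neg (by simp [hk])]

theorem pvOptIn_nil (o : Option String) : pvOptIn o [] = false := by
  cases o <;> simp [pvOptIn]

theorem pvChain_eq (selS excS : List String) (competitors : List (List (String × String))) :
    (let ac := competitors.filter (fun item => pvGet item "status" == some "active")
     let ac := if selS != [] then ac.filter (fun item => pvOptIn (pvGet item "id") selS) else ac
     if excS != [] then ac.filter (fun item => !(pvOptIn (pvGet item "id") excS)) else ac)
    = competitors.filter (pvKeep selS excS) := by
  rcases eq_or_ne selS [] with hsel | hsel <;> rcases eq_or_ne excS [] with hexc | hexc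
  · rw [if_neg (by simp [hexc]), if_neg (by simp [hsel])]
    refine List.filter_congr ?_
    intro x _
    simp [pvKeep, hsel, hexc, pvOptIn_nil]
  · rw [if_pos (by simp [hexc]), if_neg (by simp [hsel]), List.filter_filter]
    refine List.filter_congr ?_
    intro x _
    rcases Bool.eq_false_or_eq_true (pvGet x "status" == some "active") with h1 | h1 <;>
    rcases Bool.eq_false_or_eq_true (pvOptIn (pvGet x "id") excS) with h3 | h3 <;>
      simp [pvKeep, hsel, pvOptIn_nil, h1, h3]
  · rw [if_neg (by simp [hexc]), if_pos (by simp [hsel]), List.filter_filter]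
    refine List.filter_congr ?_
    intro x _
    rcases Bool.eq_false_or_eq_true (pvGet x "status" == some "active") with h1 | h1 <;>
    rcases Bool.eq_false_or_eq_true (pvOptIn (pvGet x "id") selS) with h2 | h2 <;>
      simp [pvKeep, hsel, hexc, pvOptIn_nil, h1, h2]
  · rw [if_pos (by simp [hexc]), if_pos (by simp [hsel]), List.filter_filter,
        List.filter_filter]
    refine List.filter_congr ?_
    intro x _
    rcases Bool.eq_false_or_eq_true (pvGet x "status" == some "active") with h1 | h1 <;>
    rcases Bool.eq_false_or_eq_true (pvOptIn (pvGet x "id") selS) with h2 | h2 <;>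
    rcases Bool.eq_false_or_eq_true (pvOptIn (pvGet x "id") excS) with h3 | h3 <;>
      simp [pvKeep, hsel, h1, h2, h3]

-- ===== VERDICT (by name: the statement is the Claim_ definition above) =====
theorem apply_selection_rules_py_spec : Claim_equal_apply_selection_rules_py := by
  intro competitors selected_ids excluded_ids max_selected _
  unfold Spec_apply_selection_rules_py apply_selection_rules_py apply_selection_rules_py_alt
  rw [pvLoop_eq]
  simp only [List.length_nil, List.nil_append]
  rw [← pvChain_eq (pvStripSet selected_ids) (pvStripSet excluded_ids) competitors]
  cases max_selected with
  | none => simp [pvCut]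
  | some n =>
    by_cases hn : 0 < n
    · simp only [if_pos hn, pvCut]
      rw [PySem.List.slice_to _ (by omega)]
      simp
    · simp [hn, pvCut]
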